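-- pv_equiv track=rewrite | github.com/nixternal/CodingChallenges | AdventOfCode/2016/20.py | part_one
-- ===== SOURCE A (Python) =====
-- from typing import List, Tuple
--
-- def merge_ranges(ranges: List[Tuple[int, int]]) -> List[Tuple[int, int]]:
--     """
--     Merges overlapping or adjacent IP ranges into a consolidated list.
--
--     Given a list of (start, end) tuples, this function:
--     - Sorts them by the starting value.
--     - Merges overlapping or contiguous ranges.
--
--     Args:
--         ranges (List[Tuple[int, int]]): List of blocked IP ranges.
--
--     Returns:
--         List[Tuple[int, int]]: A new list of merged IP ranges.
--     """
--
--     merged = []  # Stores merged IP ranges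
--     for start, end in sorted(ranges):  # Sort the ranges by start value
--         if not merged or merged[-1][1] < start - 1:
--             # If there's no overlap, add a new range
--             merged.append((start, end))
--         else:
--             # Merge overlapping or adjacent ranges
--             merged[-1] = (merged[-1][0], max(merged[-1][1], end))
--     return merged
--
-- def part_one(data: List[Tuple[int, int]]) -> int:
--     """
--     Finds the first available (non-blocked) IP.
--
--     - Merges the input ranges.
--     - Looks for the first gap in the blocked ranges.
--     - If the first blocked range does not start at 0, return 0.
--     - Otherwise, find the first IP that is not covered.
--
--     Args:
--         data (List[Tuple[int, int]]): List of blocked IP ranges.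
--
--     Returns:
--         int: The first non-blocked IP address.
--     """
--
--     merged_ranges = merge_ranges(data)
--
--     # If the first blocked range starts after 0, return 0
--     if merged_ranges[0][0] > 0:
--         return 0
--
--     # Look for the first gap in the blocked ranges
--     for i in range(len(merged_ranges) - 1):
--         if merged_ranges[i][1] + 1 < merged_ranges[i + 1][0]:
--             return merged_ranges[i][1] + 1  # First available IP found
--
--     return -1  # Should not happen with valid input
-- ===== SOURCE B (Python) =====
-- from typing import List, Tuple
--
-- def part_one(data: List[Tuple[int, int]]) -> int:
--     """Single sweep over the sorted ranges: track the covered end, return at the first gap."""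
--     ranges = sorted(data)
--     if ranges[0][0] > 0:
--         return 0
--     end = ranges[0][1]
--     for s, e in ranges[1:]:
--         if s - 1 > end:
--             return end + 1
--         end = max(end, e)
--     return -1
-- ===== Notes on version B (the rewrite author's own statement) =====
-- stated objective: simpler
-- what changed: B fuses A's two phases (materialize a merged-ranges list, then scan it for a gap) into one sweep over the sorted ranges that keeps only the current covered end, returning at the first gap; no merged list and no helper function exist.
import Mathlib
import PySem

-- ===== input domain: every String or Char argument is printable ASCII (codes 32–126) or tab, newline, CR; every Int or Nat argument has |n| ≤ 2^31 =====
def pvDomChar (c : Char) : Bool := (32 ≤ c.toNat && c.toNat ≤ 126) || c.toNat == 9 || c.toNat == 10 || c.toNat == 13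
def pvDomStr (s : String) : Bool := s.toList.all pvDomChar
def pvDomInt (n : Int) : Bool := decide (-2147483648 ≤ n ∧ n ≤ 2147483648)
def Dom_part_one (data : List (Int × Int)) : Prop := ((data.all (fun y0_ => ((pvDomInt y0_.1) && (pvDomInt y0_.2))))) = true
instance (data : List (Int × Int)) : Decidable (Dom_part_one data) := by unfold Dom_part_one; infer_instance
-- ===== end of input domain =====

-- B replaces A's two phases (build a merged-ranges list, then scan it) by one sweep over the
-- sorted ranges keeping only the current covered end (objective: simpler).

-- ===== PORT A =====
-- merge loop body: merged.append / merged[-1] = … on the growing list, as in A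
def pvMergeStep (merged : List (Int × Int)) (r : Int × Int) : List (Int × Int) :=
  match merged.getLast? with
  | none => merged ++ [r]                     -- 'if not merged'
  | some last =>
    if last.2 < r.1 - 1 then merged ++ [r]    -- 'merged[-1][1] < start - 1'
    else merged.dropLast ++ [(last.1, max last.2 r.2)]

def merge_ranges (ranges : List (Int × Int)) : List (Int × Int) :=
  (PySem.List.sorted2 ranges Prod.fst Prod.snd false).foldl pvMergeStep []

-- 'for i in range(len(merged)-1): if merged[i][1]+1 < merged[i+1][0]: return …' as the
-- obvious structural recursion over consecutive pairs of the same list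
def pvScanGaps : List (Int × Int) → Int
  | (_, b) :: (c, d) :: t => if b + 1 < c then b + 1 else pvScanGaps ((c, d) :: t)
  | _ => -1

def part_one (data : List (Int × Int)) : Int :=
  let merged := merge_ranges data
  match PySem.List.pyGet? merged 0 with
  | none => 0                                  -- unreachable under Pre_ (Python: IndexError on [])
  | some (a, _) => if a > 0 then 0 else pvScanGaps merged

-- ===== PORT B =====
def pvSweep (e : Int) : List (Int × Int) → Int
  | [] => -1
  | (s, e') :: t => if s - 1 > e then e + 1 else pvSweep (max e e') t

def part_one_alt (data : List (Int × Int)) : Int :=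
  match PySem.List.sorted2 data Prod.fst Prod.snd false with
  | [] => 0                                    -- unreachable under Pre_ (Python: IndexError on [])
  | (s0, e0) :: rest => if s0 > 0 then 0 else pvSweep e0 rest

-- ===== PRECONDITION & SPEC =====
-- Pre_ excludes only the empty list, on which both Pythons raise IndexError.
def Pre_part_one (data : List (Int × Int)) : Prop := data ≠ []
instance (data : List (Int × Int)) : Decidable (Pre_part_one data) := by unfold Pre_part_one; infer_instance
def pvWitness_part_one : (List (Int × Int)) := [(0, 5), (7, 9)]

def Spec_part_one (data : List (Int × Int)) (out : Int) : Prop := out = part_one_alt data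
instance (data : List (Int × Int)) (out : Int) : Decidable (Spec_part_one data out) := by unfold Spec_part_one; infer_instance

-- ===== CLAIM (what is proved, stated in full; the proofs are below) =====
def Claim_equal_part_one : Prop := ∀ (data : List (Int × Int)), Dom_part_one data → Pre_part_one data → Spec_part_one data (part_one data)

-- ===== LEMMAS AND PROOFS =====

-- proof-only recursive view of A's merge fold
def pvMergeRec : Int × Int → List (Int × Int) → List (Int × Int)
  | (s, e), [] => [(s, e)]
  | (s, e), (s', e') :: t =>
    if e < s' - 1 then (s, e) :: pvMergeRec (s', e') t else pvMergeRec (s, max e e') t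

theorem foldl_mergeStep (rest : List (Int × Int)) :
    ∀ (pre : List (Int × Int)) (s e : Int),
      rest.foldl pvMergeStep (pre ++ [(s, e)]) = pre ++ pvMergeRec (s, e) rest := by
  induction rest with
  | nil => intro pre s e; simp [pvMergeRec]
  | cons r t ih =>
    intro pre s e
    obtain ⟨s', e'⟩ := r
    simp only [List.foldl_cons, pvMergeStep, pvMergeRec, List.getLast?_concat,
      List.dropLast_concat]
    by_cases h : e < s' - 1
    · simp only [if_pos h]
      have := ih (pre ++ [(s, e)]) s' e'
      simpa [List.append_assoc] using this
    · simp only [if_neg h]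
      exact ih pre s (max e e')

theorem pvMergeRec_head (rest : List (Int × Int)) :
    ∀ (s e : Int), ∃ b t, pvMergeRec (s, e) rest = (s, b) :: t := by
  induction rest with
  | nil => intro s e; exact ⟨e, [], rfl⟩
  | cons r t ih =>
    intro s e
    obtain ⟨s', e'⟩ := r
    by_cases h : e < s' - 1
    · exact ⟨e, pvMergeRec (s', e') t, by simp [pvMergeRec, h]⟩
    · obtain ⟨b, t', ht⟩ := ih s (max e e')
      exact ⟨b, t', by simp [pvMergeRec, h, ht]⟩

theorem scan_eq_sweep (rest : List (Int × Int)) :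
    ∀ (s e : Int), pvScanGaps (pvMergeRec (s, e) rest) = pvSweep e rest := by
  induction rest with
  | nil => intro s e; simp [pvMergeRec, pvScanGaps, pvSweep]
  | cons r t ih =>
    intro s e
    obtain ⟨s', e'⟩ := r
    by_cases h : e < s' - 1
    · obtain ⟨b, t', ht⟩ := pvMergeRec_head t s' e'
      have hgap : e + 1 < s' := by omega
      have hgt : s' - 1 > e := by omega
      rw [show pvMergeRec (s, e) ((s', e') :: t) = (s, e) :: pvMergeRec (s', e') t from by
        simp [pvMergeRec, h]]
      rw [ht]
      simp only [pvScanGaps, if_pos hgap, pvSweep, if_pos hgt]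
    · have hgt : ¬ s' - 1 > e := by omega
      simp only [pvMergeRec, if_neg h, pvSweep, ih s (max e e')]

theorem part_one_spec : Claim_equal_part_one := by
  intro data _hdom hpre
  unfold Spec_part_one part_one part_one_alt merge_ranges
  have hsnil : PySem.List.sorted2 data Prod.fst Prod.snd false ≠ [] := by
    intro h
    have := PySem.List.sorted2_perm (xs := data) (k1 := Prod.fst) (k2 := Prod.snd) (rev := false)
    rw [h] at this
    exact hpre (this.symm.eq_nil)
  cases hs : PySem.List.sorted2 data Prod.fst Prod.snd false with
  | nil => exact absurd hs hsnil
  | cons hd rest =>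
    obtain ⟨s0, e0⟩ := hd
    have hfold : ((s0, e0) :: rest).foldl pvMergeStep [] = pvMergeRec (s0, e0) rest := by
      have h1 : pvMergeStep [] (s0, e0) = [] ++ [(s0, e0)] := by simp [pvMergeStep]
      rw [List.foldl_cons, h1, foldl_mergeStep rest [] s0 e0, List.nil_append]
    simp only [hfold]
    obtain ⟨b, t, ht⟩ := pvMergeRec_head rest s0 e0
    rw [ht]
    have hget : PySem.List.pyGet? ((s0, b) :: t) (0 : Int) = some (s0, b) := by
      simp [PySem.List.pyGet?, PySem.List.pyIdx?]
    rw [hget]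
    by_cases h0 : s0 > 0
    · simp [h0]
    · simp only [if_neg h0, gt_iff_lt]
      rw [← ht, scan_eq_sweep rest s0 e0]
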